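-- pv_equiv track=rewrite | github.com/mntroshkin/differential_algebra | ExteriorDifferentialAlgebra.py | signed_sort
-- ===== SOURCE A (Python) =====
-- def signed_sort(lst):
--     lst = list(lst)
--     sign = 1
--     for i in range(len(lst)):
--         for j in range(i + 1, len(lst)):
--             if lst[i] > lst[j]:
--                 sign *= -1
--                 lst[i], lst[j] = lst[j], lst[i]
--     for i in range(len(lst) - 1):
--         if lst[i] == lst[i + 1]:
--             sign = 0
--     return tuple(lst), sign
-- ===== SOURCE B (Python) =====
-- def signed_sort(lst):
--     s = sorted(lst)
--     if any(a == b for a, b in zip(s, s[1:])):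
--         return tuple(s), 0
--     _, inv = _msort(list(lst))
--     return tuple(s), (-1 if inv % 2 else 1)
--
--
-- def _msort(a):
--     # merge sort that also counts inversions
--     n = len(a)
--     if n <= 1:
--         return a, 0
--     left, cl = _msort(a[:n // 2])
--     right, cr = _msort(a[n // 2:])
--     merged, cx = _merge(left, right)
--     return merged, cl + cr + cx
--
--
-- def _merge(left, right):
--     merged = []
--     cx = 0
--     i = j = 0
--     while i < len(left) and j < len(right):
--         if left[i] > right[j]:
--             merged.append(right[j])
--             j += 1
--             cx += len(left) - i
--         else:
--             merged.append(left[i])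
--             i += 1
--     merged.extend(left[i:])
--     merged.extend(right[j:])
--     return merged, cx
-- ===== Notes on version B (the rewrite author's own statement) =====
-- stated objective: faster
-- what changed: Replaces the in-place O(n^2) swap loop (whose swap count gives the sign) by sorted() for the result tuple, an adjacent-duplicate check on the sorted list, and a merge-sort inversion count whose parity gives the sign.
import Mathlib
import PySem

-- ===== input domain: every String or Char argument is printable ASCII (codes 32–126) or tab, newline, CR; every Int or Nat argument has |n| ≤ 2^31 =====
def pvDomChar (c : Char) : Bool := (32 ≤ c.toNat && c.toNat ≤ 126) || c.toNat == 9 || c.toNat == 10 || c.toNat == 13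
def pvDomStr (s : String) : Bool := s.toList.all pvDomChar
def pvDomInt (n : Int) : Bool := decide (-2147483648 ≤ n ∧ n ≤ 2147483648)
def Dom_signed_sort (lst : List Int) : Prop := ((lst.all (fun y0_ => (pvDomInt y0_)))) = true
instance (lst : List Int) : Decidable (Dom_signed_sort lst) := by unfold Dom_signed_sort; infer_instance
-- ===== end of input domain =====

-- B replaces A's in-place quadratic swap loop by sorted() + an adjacent-duplicate check +
-- a merge-sort inversion count whose parity gives the sign (asymptotically faster).

-- ===== PORT A =====
-- Indices produced by the ranges are always in range here, so the total forms
-- pyGetD/pySetD are exact (Python A never raises).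
def signed_sort (lst : List Int) : List Int × Int :=
  let n : Int := lst.length
  let st :=
    (PySem.List.pyRange 0 n 1).foldl (fun st i =>
      (PySem.List.pyRange (i + 1) n 1).foldl (fun st j =>
        if PySem.List.pyGetD st.1 i 0 > PySem.List.pyGetD st.1 j 0 then
          (PySem.List.pySetD (PySem.List.pySetD st.1 i (PySem.List.pyGetD st.1 j 0)) j
            (PySem.List.pyGetD st.1 i 0), -st.2)
        else st) st) (lst, (1 : Int))
  let sgn :=
    (PySem.List.pyRange 0 (n - 1) 1).foldl (fun s i =>
      if PySem.List.pyGetD st.1 i 0 = PySem.List.pyGetD st.1 (i + 1) 0 then (0 : Int) else s) st.2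
  (st.1, sgn)

-- ===== PORT B =====
-- Source B's _merge: the while loop over the two index positions, as recursion on the
-- remaining suffixes; the trailing extends are the two base cases.
def pvMerge : List Int → List Int → List Int × Nat
  | [], rs => (rs, 0)
  | l :: ls, [] => (l :: ls, 0)
  | l :: ls, r :: rs =>
    if l > r then
      let p := pvMerge (l :: ls) rs
      (r :: p.1, p.2 + (l :: ls).length)
    else
      let p := pvMerge ls (r :: rs)
      (l :: p.1, p.2)
termination_by ls rs => ls.length + rs.length

-- Source B's _msort; a[:n//2] / a[n//2:] are take/drop of n/2 (n ≥ 0, so // is Nat division)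
def pvMsort (a : List Int) : List Int × Nat :=
  let n := a.length
  if n ≤ 1 then (a, 0)
  else
    let L := pvMsort (a.take (n / 2))
    let R := pvMsort (a.drop (n / 2))
    let M := pvMerge L.1 R.1
    (M.1, L.2 + R.2 + M.2)
termination_by a.length
decreasing_by
  · simp; omega
  · simp; omega

def signed_sort_alt (lst : List Int) : List Int × Int :=
  let s := PySem.List.sorted lst (fun x => x) false
  if (s.zip (PySem.List.slice s (some 1) none)).any (fun p => p.1 == p.2) then (s, 0)
  else
    let inv := (pvMsort lst).2
    (s, if inv % 2 == 1 then -1 else 1)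

-- ===== PRECONDITION & SPEC =====
def Spec_signed_sort (lst : List Int) (out : List Int × Int) : Prop := out = signed_sort_alt lst
instance (lst : List Int) (out : List Int × Int) : Decidable (Spec_signed_sort lst out) := by unfold Spec_signed_sort; infer_instance

-- ===== CLAIM (what is proved, stated in full; the proofs are below) =====
def Claim_equal_signed_sort : Prop := ∀ (lst : List Int), Dom_signed_sort lst → Spec_signed_sort lst (signed_sort lst)

-- ===== LEMMAS AND PROOFS =====

-- number of inversions (pairs earlier-element > later-element)
def pvInv : List Int → Nat
  | [] => 0
  | x :: xs => xs.countP (fun y => decide (y < x)) + pvInv xs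

-- ---------- A side: one inner pass as recursion ----------
-- pvPass h r = (minimum brought to the front, the rest as A leaves it, number of swaps)
def pvPass : Int → List Int → Int × List Int × Nat
  | h, [] => (h, [], 0)
  | h, x :: xs =>
    if h > x then
      let p := pvPass x xs
      (p.1, h :: p.2.1, p.2.2 + 1)
    else
      let p := pvPass h xs
      (p.1, x :: p.2.1, p.2.2)

lemma pvPass_cons_pos {h x : Int} (xs : List Int) (hc : h > x) :
    pvPass h (x :: xs) = ((pvPass x xs).1, h :: (pvPass x xs).2.1, (pvPass x xs).2.2 + 1) := by
  simp [pvPass, hc]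

lemma pvPass_cons_neg {h x : Int} (xs : List Int) (hc : ¬ h > x) :
    pvPass h (x :: xs) = ((pvPass h xs).1, x :: (pvPass h xs).2.1, (pvPass h xs).2.2) := by
  simp [pvPass, hc]

lemma pvPass_len (h : Int) (r : List Int) : (pvPass h r).2.1.length = r.length := by
  induction r generalizing h with
  | nil => rfl
  | cons x xs ih => simp only [pvPass]; split <;> simp [ih]

lemma pvPass_perm (h : Int) (r : List Int) :
    (h :: r).Perm ((pvPass h r).1 :: (pvPass h r).2.1) := by
  induction r generalizing h with
  | nil => exact List.Perm.refl _
  | cons x xs ih =>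
    by_cases hc : h > x
    · rw [pvPass_cons_pos xs hc]
      exact (List.Perm.cons h (ih x)).trans (List.Perm.swap _ _ _)
    · rw [pvPass_cons_neg xs hc]
      exact (List.Perm.swap _ _ _).trans ((List.Perm.cons x (ih h)).trans (List.Perm.swap _ _ _))

lemma pvPass_min (h : Int) (r : List Int) :
    (pvPass h r).1 ≤ h ∧ ∀ y ∈ r, (pvPass h r).1 ≤ y := by
  induction r generalizing h with
  | nil => exact ⟨le_refl _, by simp⟩
  | cons x xs ih =>
    by_cases hc : h > x
    · rw [pvPass_cons_pos xs hc]
      refine ⟨le_of_lt (lt_of_le_of_lt (ih x).1 hc), ?_⟩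
      intro y hy
      rcases List.mem_cons.mp hy with rfl | hy
      · exact (ih y).1
      · exact (ih x).2 y hy
    · rw [pvPass_cons_neg xs hc]
      refine ⟨(ih h).1, ?_⟩
      intro y hy
      rcases List.mem_cons.mp hy with rfl | hy
      · exact le_trans (ih h).1 (not_lt.mp hc)
      · exact (ih h).2 y hy

lemma pvPass_inv (h : Int) (r : List Int) (hn : (h :: r).Nodup) :
    pvInv (h :: r) = (pvPass h r).2.2 + pvInv ((pvPass h r).1 :: (pvPass h r).2.1) := by
  induction r generalizing h with
  | nil => simp [pvPass, pvInv]
  | cons x xs ih =>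
    by_cases hx : h > x
    · -- swap case; no distinctness needed beyond the IH
      have hperm := pvPass_perm x xs
      have hmx : (pvPass x xs).1 ≤ x := (pvPass_min x xs).1
      have hih := ih x (List.Nodup.of_cons hn)
      have hc1 := hperm.countP_eq (fun y => decide (y < h))
      rw [pvPass_cons_pos xs hx]
      simp only [pvInv, List.countP_cons] at *
      have hmh : (pvPass x xs).1 < h := lt_of_le_of_lt hmx hx
      simp only [decide_eq_true_eq] at *
      rw [if_pos hmh] at hc1
      rw [if_neg (by omega : ¬ h < (pvPass x xs).1)]
      omega
    · -- no swap: h ≤ x, and h ≠ x from Nodup, so h < x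
      have hne : h ≠ x := by
        rcases List.nodup_cons.mp hn with ⟨hm, _⟩
        exact fun e => hm (e ▸ List.mem_cons_self)
      have hlt : h < x := lt_of_le_of_ne (not_lt.mp hx) hne
      have hsub : (h :: xs).Nodup := by
        have hsl : (h :: xs).Sublist (h :: x :: xs) :=
          List.Sublist.cons₂ h (List.sublist_cons_self x xs)
        exact hn.sublist hsl
      have hperm := pvPass_perm h xs
      have hih := ih h hsub
      have hmh : (pvPass h xs).1 ≤ h := (pvPass_min h xs).1
      have hc1 := hperm.countP_eq (fun y => decide (y < x))
      rw [pvPass_cons_neg xs hx]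
      simp only [pvInv, List.countP_cons] at *
      simp only [decide_eq_true_eq] at *
      rw [if_pos (by omega : (pvPass h xs).1 < x)] at hc1
      rw [if_pos hlt] at hc1
      rw [if_neg (by omega : ¬ x < (pvPass h xs).1), if_neg (by omega : ¬ x < h)]
      omega

-- the whole first double loop: selection of minima, summing swap counts
def pvSortK : List Int → List Int × Nat
  | [] => ([], 0)
  | h :: xs =>
    let p := pvPass h xs
    let s := pvSortK p.2.1
    (p.1 :: s.1, p.2.2 + s.2)
termination_by l => l.length
decreasing_by simp [pvPass_len]

lemma pvSortK_nil : pvSortK [] = ([], 0) := by simp [pvSortK]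

lemma pvSortK_cons (h : Int) (xs : List Int) :
    pvSortK (h :: xs) = ((pvPass h xs).1 :: (pvSortK (pvPass h xs).2.1).1,
      (pvPass h xs).2.2 + (pvSortK (pvPass h xs).2.1).2) := by
  simp [pvSortK]

lemma pvSortK_perm (l : List Int) : l.Perm (pvSortK l).1 := by
  induction l using pvSortK.induct with
  | case1 => rw [pvSortK_nil]
  | case2 h xs p ih =>
    rw [pvSortK_cons]
    exact (pvPass_perm h xs).trans (List.Perm.cons _ ih)

lemma pvSortK_sorted (l : List Int) : (pvSortK l).1.Pairwise (· ≤ ·) := by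
  induction l using pvSortK.induct with
  | case1 => rw [pvSortK_nil]; simp
  | case2 h xs p ih =>
    rw [pvSortK_cons]
    refine List.pairwise_cons.mpr ⟨?_, ih⟩
    intro y hy
    have hy2 : y ∈ (pvPass h xs).2.1 := (pvSortK_perm (pvPass h xs).2.1).mem_iff.mpr hy
    have hy3 : y ∈ h :: xs := (pvPass_perm h xs).mem_iff.mpr (List.mem_cons_of_mem _ hy2)
    rcases List.mem_cons.mp hy3 with rfl | hy4
    · exact (pvPass_min y xs).1
    · exact (pvPass_min h xs).2 y hy4

lemma pvSortK_count (l : List Int) (hn : l.Nodup) : (pvSortK l).2 = pvInv l := by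
  induction l using pvSortK.induct with
  | case1 => rw [pvSortK_nil]; simp [pvInv]
  | case2 h xs p ih =>
    have ih' : (pvPass h xs).2.1.Nodup → (pvSortK (pvPass h xs).2.1).2 = pvInv (pvPass h xs).2.1 :=
      fun hh => ih hh
    have hperm := pvPass_perm h xs
    have hn2 : ((pvPass h xs).1 :: (pvPass h xs).2.1).Nodup := hperm.nodup_iff.mp hn
    have hn3 : (pvPass h xs).2.1.Nodup := List.Nodup.of_cons hn2
    have hinv := pvPass_inv h xs hn
    have hzero : (pvPass h xs).2.1.countP (fun y => decide (y < (pvPass h xs).1)) = 0 := by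
      rw [List.countP_eq_zero]
      intro y hy
      have hy3 : y ∈ h :: xs := hperm.mem_iff.mpr (List.mem_cons_of_mem _ hy)
      have hle : (pvPass h xs).1 ≤ y := by
        rcases List.mem_cons.mp hy3 with rfl | hy4
        · exact (pvPass_min y xs).1
        · exact (pvPass_min h xs).2 y hy4
      simp [not_lt.mpr hle]
    rw [pvSortK_cons]
    simp only
    rw [ih' hn3, hinv]
    simp only [pvInv, hzero]
    omega

-- ---------- bridges: the index folds of port A compute pvPass / pvSortK ----------
lemma pv_getD_mid (p tl : List Int) (h : Int) : (p ++ h :: tl).getD p.length 0 = h := by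
  induction p with
  | nil => simp
  | cons a p ih => simpa using ih

lemma pv_set_mid (p tl : List Int) (h v : Int) : (p ++ h :: tl).set p.length v = p ++ v :: tl := by
  induction p with
  | nil => simp
  | cons a p ih => simpa using ih

lemma inner_bridge (p : List Int) (i : Int) (hi : i = (p.length : Int)) :
    ∀ (r d : List Int) (h sgn a b : Int),
      a = i + 1 + (d.length : Int) → b = a + (r.length : Int) →
      (PySem.List.pyRange a b 1).foldl
        (fun st j =>
          if PySem.List.pyGetD st.1 i 0 > PySem.List.pyGetD st.1 j 0 then
            (PySem.List.pySetD (PySem.List.pySetD st.1 i (PySem.List.pyGetD st.1 j 0)) j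
              (PySem.List.pyGetD st.1 i 0), -st.2)
          else st)
        (p ++ h :: d ++ r, sgn)
      = (p ++ (pvPass h r).1 :: d ++ (pvPass h r).2.1, sgn * (-1) ^ (pvPass h r).2.2) := by
  intro r
  induction r with
  | nil =>
    intro d h sgn a b ha hb
    rw [PySem.List.pyRange_one_eq_nil (by simp at hb; omega)]
    simp [pvPass]
  | cons x r' ih =>
    intro d h sgn a b ha hb
    have hb' : a < b := by simp at hb; omega
    rw [PySem.List.pyRange_one_cons hb']
    simp only [List.foldl_cons]
    have hacast : a = ((p.length + 1 + d.length : Nat) : Int) := by push_cast; omega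
    have e1 : p ++ h :: d ++ x :: r' = p ++ h :: (d ++ x :: r') := by simp
    have e2 : p ++ h :: d ++ x :: r' = (p ++ h :: d) ++ x :: r' := by simp
    have elen : (p ++ h :: d).length = p.length + 1 + d.length := by simp; omega
    have hread_i : PySem.List.pyGetD (p ++ h :: d ++ x :: r') i 0 = h := by
      rw [hi, PySem.List.pyGetD_natCast, e1]
      exact pv_getD_mid p (d ++ x :: r') h
    have hread_j : PySem.List.pyGetD (p ++ h :: d ++ x :: r') a 0 = x := by
      rw [hacast, PySem.List.pyGetD_natCast, e2, ← elen]
      exact pv_getD_mid (p ++ h :: d) r' x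
    by_cases hc : h > x
    · -- swap
      have hset : PySem.List.pySetD (PySem.List.pySetD (p ++ h :: d ++ x :: r') i x) a h
          = p ++ x :: (d ++ [h]) ++ r' := by
        rw [hi, PySem.List.pySetD_natCast, e1, pv_set_mid p (d ++ x :: r') h x,
          hacast, PySem.List.pySetD_natCast]
        have e3 : p ++ x :: (d ++ x :: r') = (p ++ x :: d) ++ x :: r' := by simp
        have elen2 : (p ++ x :: d).length = p.length + 1 + d.length := by simp; omega
        rw [e3, ← elen2, pv_set_mid (p ++ x :: d) r' x h]
        simp
      simp only [hread_i, hread_j, if_pos hc, hset]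
      rw [ih (d ++ [h]) x (-sgn) (a + 1) b (by simp; omega) (by simp at hb ⊢; omega)]
      rw [pvPass_cons_pos r' hc]
      simp only [Prod.mk.injEq]
      constructor
      · simp
      · ring
    · -- no swap
      simp only [hread_i, hread_j, if_neg hc]
      have e4 : p ++ h :: d ++ x :: r' = p ++ h :: (d ++ [x]) ++ r' := by simp
      rw [e4, ih (d ++ [x]) h sgn (a + 1) b (by simp; omega) (by simp at hb ⊢; omega)]
      rw [pvPass_cons_neg r' hc]
      simp only [Prod.mk.injEq]
      constructor
      · simp
      · trivial

lemma outer_bridge (n : Int) :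
    ∀ (r p : List Int) (sgn a : Int), a = (p.length : Int) → n = a + (r.length : Int) →
      (PySem.List.pyRange a n 1).foldl
        (fun st i =>
          (PySem.List.pyRange (i + 1) n 1).foldl (fun st j =>
            if PySem.List.pyGetD st.1 i 0 > PySem.List.pyGetD st.1 j 0 then
              (PySem.List.pySetD (PySem.List.pySetD st.1 i (PySem.List.pyGetD st.1 j 0)) j
                (PySem.List.pyGetD st.1 i 0), -st.2)
            else st) st)
        (p ++ r, sgn)
      = (p ++ (pvSortK r).1, sgn * (-1) ^ (pvSortK r).2) := by
  intro r
  induction r using pvSortK.induct with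
  | case1 =>
    intro p sgn a ha hn
    rw [PySem.List.pyRange_one_eq_nil (by simp at hn; omega), pvSortK_nil]
    simp
  | case2 h xs q ih =>
    intro p sgn a ha hn
    have ih' : ∀ (p' : List Int) (sgn' a' : Int), a' = (p'.length : Int) →
        n = a' + ((pvPass h xs).2.1.length : Int) →
        (PySem.List.pyRange a' n 1).foldl
          (fun st i =>
            (PySem.List.pyRange (i + 1) n 1).foldl (fun st j =>
              if PySem.List.pyGetD st.1 i 0 > PySem.List.pyGetD st.1 j 0 then
                (PySem.List.pySetD (PySem.List.pySetD st.1 i (PySem.List.pyGetD st.1 j 0)) j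
                  (PySem.List.pyGetD st.1 i 0), -st.2)
              else st) st)
          (p' ++ (pvPass h xs).2.1, sgn')
        = (p' ++ (pvSortK (pvPass h xs).2.1).1, sgn' * (-1) ^ (pvSortK (pvPass h xs).2.1).2) :=
      fun p' sgn' a' h1 h2 => ih p' sgn' a' h1 h2
    have hb' : a < n := by simp at hn; omega
    rw [PySem.List.pyRange_one_cons hb']
    simp only [List.foldl_cons]
    have e0 : p ++ h :: xs = p ++ h :: ([] : List Int) ++ xs := by simp
    rw [e0, inner_bridge p a ha xs [] h sgn (a + 1) n (by simp) (by simp at hn ⊢; omega)]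
    have e1 : p ++ (pvPass h xs).1 :: ([] : List Int) ++ (pvPass h xs).2.1
        = (p ++ [(pvPass h xs).1]) ++ (pvPass h xs).2.1 := by simp
    rw [e1, ih' (p ++ [(pvPass h xs).1]) (sgn * (-1) ^ (pvPass h xs).2.2) (a + 1)
      (by simp; omega) (by simp [pvPass_len] at hn ⊢; omega)]
    rw [pvSortK_cons]
    simp only [Prod.mk.injEq]
    constructor
    · simp
    · rw [mul_assoc, ← pow_add]

-- the duplicate-marking loop: sets the sign to 0 iff some index satisfies the test
lemma foldl_zero_if (P : Int → Prop) [DecidablePred P] :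
    ∀ (l : List Int) (s : Int),
      l.foldl (fun s i => if P i then (0 : Int) else s) s
        = if l.any (fun i => decide (P i)) = true then 0 else s := by
  intro l
  induction l with
  | nil => simp
  | cons x xs ih =>
    intro s
    simp only [List.foldl_cons, List.any_cons]
    by_cases hx : P x
    · rw [if_pos hx, ih 0]
      simp [hx]
    · rw [if_neg hx, ih s]
      simp [hx]

-- ---------- the two adjacent-duplicate tests agree ----------
lemma pyAny_adj_iff (S : List Int) :
    ((PySem.List.pyRange 0 ((S.length : Int) - 1) 1).any
        (fun i => decide (PySem.List.pyGetD S i 0 = PySem.List.pyGetD S (i + 1) 0))) = true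
      ↔ ∃ k : Nat, k + 1 < S.length ∧ S.getD k 0 = S.getD (k + 1) 0 := by
  rw [List.any_eq_true]
  constructor
  · rintro ⟨i, hmem, hdec⟩
    rw [PySem.List.mem_pyRange_one] at hmem
    obtain ⟨h0, h1⟩ := hmem
    obtain ⟨k, rfl⟩ : ∃ k : Nat, i = (k : Int) := ⟨i.toNat, by omega⟩
    refine ⟨k, by omega, ?_⟩
    rw [show ((k : Nat) : Int) + 1 = ((k + 1 : Nat) : Int) from by push_cast; ring] at hdec
    simp only [PySem.List.pyGetD_natCast, decide_eq_true_eq] at hdec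
    exact hdec
  · rintro ⟨k, hk, he⟩
    refine ⟨(k : Int), ?_, ?_⟩
    · rw [PySem.List.mem_pyRange_one]; omega
    · rw [show ((k : Nat) : Int) + 1 = ((k + 1 : Nat) : Int) from by push_cast; ring]
      simp only [PySem.List.pyGetD_natCast, decide_eq_true_eq]
      exact he

lemma zipAny_adj_iff (S : List Int) :
    ((S.zip (PySem.List.slice S (some 1) none)).any (fun p => p.1 == p.2)) = true
      ↔ ∃ k : Nat, k + 1 < S.length ∧ S.getD k 0 = S.getD (k + 1) 0 := by
  rw [PySem.List.slice_from_one, List.any_eq_true]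
  constructor
  · rintro ⟨q, hmem, hdec⟩
    rw [List.mem_iff_getElem] at hmem
    obtain ⟨k, hk, he⟩ := hmem
    rw [List.getElem_zip] at he
    have hk2 : k + 1 < S.length := by
      simp [List.length_zip, List.length_tail] at hk
      omega
    refine ⟨k, hk2, ?_⟩
    have h1 : S.tail[k]'(by simp [List.length_tail]; omega) = S[k + 1]'hk2 :=
      List.getElem_tail _
    rw [← he] at hdec
    simp only [beq_iff_eq] at hdec
    rw [List.getD_eq_getElem S 0 (by omega : k < S.length),
      List.getD_eq_getElem S 0 hk2, ← h1]
    exact hdec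
  · rintro ⟨k, hk, he⟩
    have hkz : k < (S.zip S.tail).length := by
      simp [List.length_zip, List.length_tail]
      omega
    refine ⟨(S.zip S.tail)[k], List.getElem_mem hkz, ?_⟩
    rw [List.getElem_zip]
    simp only [beq_iff_eq]
    have h1 : S.tail[k]'(by simp [List.length_tail]; omega) = S[k + 1]'hk :=
      List.getElem_tail _
    rw [h1]
    rw [List.getD_eq_getElem S 0 (by omega : k < S.length), List.getD_eq_getElem S 0 hk] at he
    exact he

-- a ≤-sorted list with no equal adjacent pair has no duplicates
lemma sorted_no_adj_nodup (S : List Int) (hs : S.Pairwise (· ≤ ·))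
    (hnone : ¬ ∃ k : Nat, k + 1 < S.length ∧ S.getD k 0 = S.getD (k + 1) 0) : S.Nodup := by
  push_neg at hnone
  rw [List.pairwise_iff_getElem] at hs
  have hp : List.Pairwise (fun a b => a ≠ b) S := by
    rw [List.pairwise_iff_getElem]
    intro i j hi hj hij heq
    have h1 : S[i] ≤ S[i + 1]'(by omega) := hs i (i + 1) hi (by omega) (by omega)
    have h2 : S[i + 1]'(by omega) ≤ S[j] := by
      rcases Nat.eq_or_lt_of_le (by omega : i + 1 ≤ j) with hh | hh
      · exact le_of_eq (by congr 1)
      · exact hs (i + 1) j (by omega) hj hh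
    have h3 : S[i] = S[i + 1]'(by omega) := le_antisymm h1 (heq ▸ h2)
    have h4 := hnone i (by omega)
    rw [List.getD_eq_getElem S 0 hi, List.getD_eq_getElem S 0 (by omega : i + 1 < S.length)] at h4
    exact h4 h3
  exact hp

-- ---------- B side: merge sort counts inversions ----------
def pvCross (u v : List Int) : Nat := (u.map (fun x => v.countP (fun y => decide (y < x)))).sum

lemma pvCross_cons_left (x : Int) (xs v : List Int) :
    pvCross (x :: xs) v = v.countP (fun y => decide (y < x)) + pvCross xs v := by
  simp [pvCross]

lemma pvCross_nil_right (u : List Int) : pvCross u [] = 0 := by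
  induction u with
  | nil => simp [pvCross]
  | cons x xs ih => rw [pvCross_cons_left, ih]; simp

lemma pvCross_cons_right_all (u : List Int) (r : Int) (rs : List Int)
    (h : ∀ x ∈ u, r < x) : pvCross u (r :: rs) = pvCross u rs + u.length := by
  induction u with
  | nil => simp [pvCross]
  | cons x xs ih =>
    have hx : r < x := h x List.mem_cons_self
    rw [pvCross_cons_left, pvCross_cons_left,
      ih (fun y hy => h y (List.mem_cons_of_mem _ hy)), List.countP_cons]
    simp only [decide_eq_true_eq, List.length_cons]
    rw [if_pos hx]
    omega

lemma pvCross_perm_left (u u' v : List Int) (h : u.Perm u') : pvCross u v = pvCross u' v :=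
  List.Perm.sum_eq (h.map _)

lemma pvCross_perm_right (u v v' : List Int) (h : v.Perm v') : pvCross u v = pvCross u v' := by
  unfold pvCross
  congr 1
  apply List.map_congr_left
  intro x _
  exact h.countP_eq _

lemma pvInv_append (u v : List Int) : pvInv (u ++ v) = pvInv u + pvInv v + pvCross u v := by
  induction u with
  | nil => simp [pvInv, pvCross]
  | cons x xs ih =>
    simp only [List.cons_append, pvInv, List.countP_append, pvCross_cons_left, ih]
    omega

lemma pvMerge_cons_pos {l r : Int} (ls rs : List Int) (hc : l > r) :
    pvMerge (l :: ls) (r :: rs)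
      = (r :: (pvMerge (l :: ls) rs).1, (pvMerge (l :: ls) rs).2 + (l :: ls).length) := by
  simp [pvMerge, hc]

lemma pvMerge_cons_neg {l r : Int} (ls rs : List Int) (hc : ¬ l > r) :
    pvMerge (l :: ls) (r :: rs) = (l :: (pvMerge ls (r :: rs)).1, (pvMerge ls (r :: rs)).2) := by
  simp [pvMerge, hc]

lemma pvMerge_perm (L R : List Int) : (pvMerge L R).1.Perm (L ++ R) := by
  induction L, R using pvMerge.induct with
  | case1 rs => simp [pvMerge]
  | case2 l ls => simp [pvMerge]
  | case3 l ls r rs hc ih =>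
    rw [pvMerge_cons_pos ls rs hc]
    exact (ih.cons r).trans List.perm_middle.symm
  | case4 l ls r rs hc ih =>
    rw [pvMerge_cons_neg ls rs hc]
    exact ih.cons l

lemma pvMerge_sorted (L R : List Int) (hL : L.Pairwise (· ≤ ·)) (hR : R.Pairwise (· ≤ ·)) :
    (pvMerge L R).1.Pairwise (· ≤ ·) := by
  induction L, R using pvMerge.induct with
  | case1 rs => simpa [pvMerge] using hR
  | case2 l ls => simpa [pvMerge] using hL
  | case3 l ls r rs hc ih =>
    rw [pvMerge_cons_pos ls rs hc]
    refine List.pairwise_cons.mpr ⟨?_, ih hL (List.Pairwise.of_cons hR)⟩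
    intro y hy
    have hy2 : y ∈ (l :: ls) ++ rs := (pvMerge_perm (l :: ls) rs).mem_iff.mp hy
    rcases List.mem_append.mp hy2 with hy3 | hy3
    · rcases List.mem_cons.mp hy3 with rfl | hy4
      · exact le_of_lt hc
      · exact le_trans (le_of_lt hc) (List.rel_of_pairwise_cons hL hy4)
    · exact List.rel_of_pairwise_cons hR hy3
  | case4 l ls r rs hc ih =>
    rw [pvMerge_cons_neg ls rs hc]
    refine List.pairwise_cons.mpr ⟨?_, ih (List.Pairwise.of_cons hL) hR⟩
    intro y hy
    have hy2 : y ∈ ls ++ (r :: rs) := (pvMerge_perm ls (r :: rs)).mem_iff.mp hy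
    rcases List.mem_append.mp hy2 with hy3 | hy3
    · exact List.rel_of_pairwise_cons hL hy3
    · rcases List.mem_cons.mp hy3 with rfl | hy4
      · exact not_lt.mp hc
      · exact le_trans (not_lt.mp hc) (List.rel_of_pairwise_cons hR hy4)

lemma pvMerge_count (L R : List Int) (hL : L.Pairwise (· ≤ ·)) (hR : R.Pairwise (· ≤ ·)) :
    (pvMerge L R).2 = pvCross L R := by
  induction L, R using pvMerge.induct with
  | case1 rs => simp [pvMerge, pvCross]
  | case2 l ls => simp [pvMerge, pvCross_nil_right]
  | case3 l ls r rs hc ih =>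
    rw [pvMerge_cons_pos ls rs hc]
    simp only
    rw [ih hL (List.Pairwise.of_cons hR)]
    rw [pvCross_cons_right_all (l :: ls) r rs ?_]
    intro x hx
    rcases List.mem_cons.mp hx with rfl | hx2
    · exact hc
    · exact lt_of_lt_of_le hc (List.rel_of_pairwise_cons hL hx2)
  | case4 l ls r rs hc ih =>
    rw [pvMerge_cons_neg ls rs hc]
    simp only
    rw [ih (List.Pairwise.of_cons hL) hR, pvCross_cons_left]
    have hz : (r :: rs).countP (fun y => decide (y < l)) = 0 := by
      rw [List.countP_eq_zero]
      intro y hy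
      rcases List.mem_cons.mp hy with rfl | hy2
      · simpa using not_lt.mp hc
      · have hly : l ≤ y := le_trans (not_lt.mp hc) (List.rel_of_pairwise_cons hR hy2)
        simpa using not_lt.mpr hly
    omega

lemma pvMsort_small (a : List Int) (h : a.length ≤ 1) : pvMsort a = (a, 0) := by
  rw [pvMsort]
  simp [h]

lemma pvMsort_rec (a : List Int) (h : ¬ a.length ≤ 1) :
    pvMsort a = ((pvMerge (pvMsort (a.take (a.length / 2))).1 (pvMsort (a.drop (a.length / 2))).1).1,
      (pvMsort (a.take (a.length / 2))).2 + (pvMsort (a.drop (a.length / 2))).2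
        + (pvMerge (pvMsort (a.take (a.length / 2))).1 (pvMsort (a.drop (a.length / 2))).1).2) := by
  rw [pvMsort]
  simp [h]

lemma pvMsort_spec (a : List Int) :
    (pvMsort a).1.Perm a ∧ (pvMsort a).1.Pairwise (· ≤ ·) ∧ (pvMsort a).2 = pvInv a := by
  induction a using pvMsort.induct with
  | case1 x n h =>
    have h' : x.length ≤ 1 := h
    rw [pvMsort_small x h']
    refine ⟨List.Perm.refl _, ?_, ?_⟩
    · cases x with
      | nil => simp
      | cons y ys =>
        cases ys with
        | nil => simp
        | cons z t => simp at h'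
    · cases x with
      | nil => simp [pvInv]
      | cons y ys =>
        cases ys with
        | nil => simp [pvInv]
        | cons z t => simp at h'
  | case2 x n h ihL ihR =>
    have h' : ¬ x.length ≤ 1 := h
    have ihL' : (pvMsort (x.take (x.length / 2))).1.Perm (x.take (x.length / 2))
        ∧ (pvMsort (x.take (x.length / 2))).1.Pairwise (· ≤ ·)
        ∧ (pvMsort (x.take (x.length / 2))).2 = pvInv (x.take (x.length / 2)) := ihL
    have ihR' : (pvMsort (x.drop (x.length / 2))).1.Perm (x.drop (x.length / 2))
        ∧ (pvMsort (x.drop (x.length / 2))).1.Pairwise (· ≤ ·)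
        ∧ (pvMsort (x.drop (x.length / 2))).2 = pvInv (x.drop (x.length / 2)) := ihR
    obtain ⟨pL, sL, cL⟩ := ihL'
    obtain ⟨pR, sR, cR⟩ := ihR'
    have hsplit : x.take (x.length / 2) ++ x.drop (x.length / 2) = x := List.take_append_drop _ _
    rw [pvMsort_rec x h']
    refine ⟨?_, ?_, ?_⟩
    · refine (pvMerge_perm _ _).trans ((pL.append pR).trans ?_)
      rw [hsplit]
    · exact pvMerge_sorted _ _ sL sR
    · simp only
      rw [pvMerge_count _ _ sL sR, cL, cR,
        pvCross_perm_left _ _ _ pL, pvCross_perm_right _ _ _ pR]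
      have hap := pvInv_append (x.take (x.length / 2)) (x.drop (x.length / 2))
      rw [hsplit] at hap
      omega

-- ---------- sign parity ----------
lemma neg_one_pow_eq (m : Nat) :
    ((-1 : Int)) ^ m = if m % 2 == 1 then -1 else 1 := by
  rcases Nat.even_or_odd m with he | ho
  · rw [Even.neg_one_pow he]
    simp [Nat.even_iff.mp he]
  · rw [Odd.neg_one_pow ho]
    simp [Nat.odd_iff.mp ho]

-- ---------- main equality ----------
lemma signed_sort_eq_alt (lst : List Int) : signed_sort lst = signed_sort_alt lst := by
  have houter := outer_bridge ((lst.length : Int)) lst [] 1 0 (by simp) (by simp)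
  simp only [List.nil_append] at houter
  have hsorted : PySem.List.sorted lst (fun x => x) false = (pvSortK lst).1 :=
    PySem.List.sorted_id_eq_of_perm_of_pairwise lst (pvSortK lst).1
      (pvSortK_perm lst).symm (pvSortK_sorted lst)
  have hlen : (pvSortK lst).1.length = lst.length := ((pvSortK_perm lst).length_eq).symm
  unfold signed_sort signed_sort_alt
  simp only []
  rw [houter]
  simp only [one_mul]
  rw [foldl_zero_if (fun i => PySem.List.pyGetD (pvSortK lst).1 i 0
      = PySem.List.pyGetD (pvSortK lst).1 (i + 1) 0)]
  rw [hsorted]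
  rw [show ((lst.length : Nat) : Int) = (((pvSortK lst).1.length : Nat) : Int) from by
    rw [hlen]]
  by_cases hdup : ∃ k : Nat, k + 1 < (pvSortK lst).1.length
      ∧ (pvSortK lst).1.getD k 0 = (pvSortK lst).1.getD (k + 1) 0
  · rw [if_pos ((pyAny_adj_iff _).mpr hdup), if_pos ((zipAny_adj_iff _).mpr hdup)]
  · rw [if_neg (fun hh => hdup ((pyAny_adj_iff _).mp hh)),
      if_neg (fun hh => hdup ((zipAny_adj_iff _).mp hh))]
    have hnodupS : (pvSortK lst).1.Nodup :=
      sorted_no_adj_nodup _ (pvSortK_sorted lst) hdup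
    have hnodup : lst.Nodup := (pvSortK_perm lst).nodup_iff.mpr hnodupS
    rw [pvSortK_count lst hnodup, (pvMsort_spec lst).2.2, neg_one_pow_eq]

-- ===== VERDICT (by name: the statement is the Claim_ definition above) =====
theorem signed_sort_spec : Claim_equal_signed_sort := by
  intro lst _
  unfold Spec_signed_sort
  exact signed_sort_eq_alt lst
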